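-- pv_equiv track=rewrite | github.com/angelmorales0/-angelmorales0-sw-challenge-fall-2024 | load.py | validate_interval
-- ===== SOURCE A (Python) =====
-- def validate_interval(interval):
--
--     if not interval:
--         return False
--
--     valid_units = {'s', 'm', 'h', 'd'}
--     num = ""
--
--     for char in interval:
--         if char.isdigit():
--             num += char
--         elif char in valid_units:
--             if not num:  # No number before unit
--                 return False
--             num = ""
--         else:
--             return False
--
--     return num == ""  # Should have ended with a valid unit
-- ===== SOURCE B (Python) =====
-- def validate_interval(interval):
--     if not interval:
--         return False
--     s = interval
--     while s:
--         k = 0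
--         while k < len(s) and s[k].isdigit():
--             k += 1
--         if k == 0 or k == len(s) or s[k] not in ('s', 'm', 'h', 'd'):
--             return False
--         s = s[k + 1:]
--     return True
-- ===== Notes on version B (the rewrite author's own statement) =====
-- stated objective: alternative
-- what changed: B replaces A's char-by-char scan with a digit accumulator string by a tokenising loop: repeatedly consume a maximal digit run, require the next char to be a unit, and continue on the remaining suffix; no accumulator is kept.
import Mathlib
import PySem

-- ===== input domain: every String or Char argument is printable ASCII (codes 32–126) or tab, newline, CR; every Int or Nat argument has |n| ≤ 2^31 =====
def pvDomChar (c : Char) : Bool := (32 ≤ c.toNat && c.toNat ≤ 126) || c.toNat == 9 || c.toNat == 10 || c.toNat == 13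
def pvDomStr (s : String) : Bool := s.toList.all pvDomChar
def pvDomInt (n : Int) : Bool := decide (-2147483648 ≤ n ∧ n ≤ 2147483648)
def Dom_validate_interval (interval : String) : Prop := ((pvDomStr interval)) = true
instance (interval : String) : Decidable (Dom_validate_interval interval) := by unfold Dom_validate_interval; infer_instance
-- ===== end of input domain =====

-- B replaces A's accumulator scan by a tokenising loop over maximal digit runs; alternative decomposition, same O(n) cost.


-- ===== PORT A =====
-- A's for-loop over the characters, carrying the accumulated digit string `num`.
def goA : List Char → List Char → Bool
  | [], num => num.isEmpty
  | c :: rest, num =>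
    if PySem.Chars.isdigit c then goA rest (num ++ [c])
    else if c = 's' ∨ c = 'm' ∨ c = 'h' ∨ c = 'd' then
      if num.isEmpty then false else goA rest []
    else false

def validate_interval (interval : String) : Bool :=
  if interval.toList.isEmpty then false
  else goA interval.toList []

-- ===== PORT B =====
-- B's outer while loop on the remaining suffix; the inner digit-counting while is `dropWhile isdigit`.
def goB : List Char → Bool
  | [] => true
  | c :: cs =>
    let rest := (c :: cs).dropWhile PySem.Chars.isdigit
    if rest.length = (c :: cs).length then false       -- k == 0
    else
      match _h : rest with
      | [] => false                                     -- k == len(s)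
      | u :: tl =>
        if u = 's' ∨ u = 'm' ∨ u = 'h' ∨ u = 'd' then goB tl else false
  termination_by l => l.length
  decreasing_by
    have hle := List.length_dropWhile_le (p := PySem.Chars.isdigit) (l := c :: cs)
    rw [show List.dropWhile PySem.Chars.isdigit (c :: cs) = u :: tl from _h] at hle
    simp at hle ⊢
    omega

def validate_interval_alt (interval : String) : Bool :=
  if interval.toList.isEmpty then false
  else goB interval.toList

-- ===== PRECONDITION & SPEC =====
def Spec_validate_interval (interval : String) (out : Bool) : Prop := out = validate_interval_alt interval
instance (interval : String) (out : Bool) : Decidable (Spec_validate_interval interval out) := by unfold Spec_validate_interval; infer_instance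

-- ===== CLAIM (what is proved, stated in full; the proofs are below) =====
def Claim_equal_validate_interval : Prop := ∀ (interval : String), Dom_validate_interval interval → Spec_validate_interval interval (validate_interval interval)

-- ===== LEMMAS AND PROOFS =====

theorem goB_cons (c : Char) (cs : List Char) :
    goB (c :: cs) =
      (if ((c :: cs).dropWhile PySem.Chars.isdigit).length = (c :: cs).length then false
       else
         match (c :: cs).dropWhile PySem.Chars.isdigit with
         | [] => false
         | u :: tl => if u = 's' ∨ u = 'm' ∨ u = 'h' ∨ u = 'd' then goB tl else false) := by
  rw [goB]
  rcases h2 : List.dropWhile PySem.Chars.isdigit (c :: cs) with _ | ⟨u, tl⟩ <;> simp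

theorem goA_eq_goB (l : List Char) : ∀ num : List Char, num.all PySem.Chars.isdigit → goA l num = goB (num ++ l) := by
  induction l with
  | nil =>
    intro num hnum
    cases num with
    | nil => simp [goA, goB]
    | cons a as =>
      have h1 : (a :: as).dropWhile PySem.Chars.isdigit = [] :=
        (List.dropWhile_eq_nil_iff (p := PySem.Chars.isdigit)).mpr
          (fun x hx => List.all_eq_true.mp hnum x (by simp [hx]))
      simp only [List.append_nil, goA, goB_cons, h1]
      simp
  | cons c rest ih =>
    intro num hnum
    by_cases hd : PySem.Chars.isdigit c
    · have h2 : goB (num ++ c :: rest) = goB ((num ++ [c]) ++ rest) := by simp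
      rw [h2, goA, if_pos hd]
      exact ih (num ++ [c]) (by simp_all)
    · -- c is not a digit: the dropWhile of num ++ c :: rest is c :: rest
      have hdw : (num ++ c :: rest).dropWhile PySem.Chars.isdigit = c :: rest := by
        rw [List.dropWhile_append]
        have h1 : num.dropWhile PySem.Chars.isdigit = [] :=
          (List.dropWhile_eq_nil_iff (p := PySem.Chars.isdigit)).mpr
            (fun x hx => List.all_eq_true.mp hnum x (by simp [hx]))
        rw [h1, List.dropWhile_cons_of_neg hd]
        simp
      rw [goA, if_neg hd]
      cases num with
      | nil =>
        rw [List.nil_append] at hdw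
        rw [List.nil_append, goB_cons]
        simp [hdw]
      | cons a as =>
        have hdw2 : List.dropWhile PySem.Chars.isdigit (a :: (as ++ c :: rest)) = c :: rest := by
          simpa using hdw
        have hne : ¬ ((List.dropWhile PySem.Chars.isdigit (a :: (as ++ c :: rest))).length
            = (a :: (as ++ c :: rest)).length) := by
          rw [hdw2]; simp; omega
        rw [show (a :: as) ++ c :: rest = a :: (as ++ c :: rest) from rfl, goB_cons, if_neg hne, hdw2]
        by_cases hu : c = 's' ∨ c = 'm' ∨ c = 'h' ∨ c = 'd'
        · simp only [if_pos hu, List.isEmpty_cons, Bool.false_eq_true, if_false]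
          simpa using ih [] (by simp)
        · simp [hu]

-- ===== VERDICT (by name: the statement is the Claim_ definition above) =====
theorem validate_interval_spec : Claim_equal_validate_interval := by
  intro interval _
  unfold Spec_validate_interval validate_interval validate_interval_alt
  by_cases h : interval.toList.isEmpty
  · simp [h]
  · simp only [h]
    simpa using goA_eq_goB interval.toList [] (by simp)
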